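-- pv_equiv track=rewrite | github.com/hg6658/DS-Algo | CodeStudio/Love Babbar Contest 3/MakeItEqual.py | makeItEqual
-- ===== SOURCE A (Python) =====
-- def makeItEqual(a: int, b: int, c: int)-> int:
--
--     # Write your Code here
--     newA=a
--     newB=b
--     newC = c;
--     flips=0;
--     for i in range(30):
--         if((c>>i)&1==1):
--             if((a>>i)&1==0):
--                 flips+=1;
--             if((b>>i)&1==0):
--                 flips+=1;
--         else:
--             if((a>>i)&1==1 and (b>>i)&1==1):
--                 flips+=1;
--     return flips
-- ===== SOURCE B (Python) =====
-- def makeItEqual(a: int, b: int, c: int) -> int: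
--     M = (1 << 30) - 1
--     return (bin(~a & c & M).count('1')
--             + bin(~b & c & M).count('1')
--             + bin(a & b & ~c & M).count('1'))
-- ===== Notes on version B (the rewrite author's own statement) =====
-- stated objective: simpler
-- what changed: Replaced the 30-iteration per-bit loop with a closed-form expression: three bitwise combinations (~a&c, ~b&c, a&b&~c) masked to 30 bits, whose popcounts are summed.
import Mathlib
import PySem

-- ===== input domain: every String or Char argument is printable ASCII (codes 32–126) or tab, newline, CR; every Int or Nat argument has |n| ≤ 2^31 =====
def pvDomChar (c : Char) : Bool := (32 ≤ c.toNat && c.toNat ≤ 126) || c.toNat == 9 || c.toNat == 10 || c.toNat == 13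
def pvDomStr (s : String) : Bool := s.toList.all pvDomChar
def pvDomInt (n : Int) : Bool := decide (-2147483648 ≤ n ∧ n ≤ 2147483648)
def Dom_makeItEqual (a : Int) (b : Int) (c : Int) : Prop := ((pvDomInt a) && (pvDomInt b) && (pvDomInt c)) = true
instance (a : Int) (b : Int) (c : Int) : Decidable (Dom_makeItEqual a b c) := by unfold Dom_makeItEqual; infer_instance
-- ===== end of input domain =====

-- B replaces A's 30-iteration per-bit loop by a closed-form sum of three popcounts of masked bitwise combinations (objective: simpler).

-- ===== PORT A =====
-- Loop `for i in range(30)` with Source A's per-bit conditions, as a fold over List.range 30.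
-- Python `x >> i` is arithmetic shift = Int.shiftRight; `x & 1` = Int.land x 1 (exact on negatives too).
def makeItEqual (a : Int) (b : Int) (c : Int) : Int :=
  (List.range 30).foldl (fun flips i =>
    if Int.land (Int.shiftRight c i) 1 = 1 then
      let flips := if Int.land (Int.shiftRight a i) 1 = 0 then flips + 1 else flips
      if Int.land (Int.shiftRight b i) 1 = 0 then flips + 1 else flips
    else
      if Int.land (Int.shiftRight a i) 1 = 1 ∧ Int.land (Int.shiftRight b i) 1 = 1 then flips + 1
      else flips) 0

-- ===== PORT B =====
-- `bin(x).count('1')` on a nonnegative int: the count of 1-bits, by repeated division by 2.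
def pvPopcount : Nat → Nat
  | 0 => 0
  | n + 1 => (n + 1) % 2 + pvPopcount ((n + 1) / 2)
decreasing_by exact Nat.div_lt_self (Nat.succ_pos n) Nat.one_lt_two

-- Python `~x` = Int.lnot, `&` = Int.land; the masked values are nonnegative, so .toNat is exact.
def makeItEqual_alt (a : Int) (b : Int) (c : Int) : Int :=
  let M : Int := ((1 : Int) <<< (30 : Nat)) - 1
  (pvPopcount (Int.land (Int.land (Int.lnot a) c) M).toNat : Int)
  + (pvPopcount (Int.land (Int.land (Int.lnot b) c) M).toNat : Int)
  + (pvPopcount (Int.land (Int.land (Int.land a b) (Int.lnot c)) M).toNat : Int)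

-- ===== PRECONDITION & SPEC =====
def Spec_makeItEqual (a : Int) (b : Int) (c : Int) (out : Int) : Prop := out = makeItEqual_alt a b c
instance (a : Int) (b : Int) (c : Int) (out : Int) : Decidable (Spec_makeItEqual a b c out) := by unfold Spec_makeItEqual; infer_instance

-- ===== CLAIM (what is proved, stated in full; the proofs are below) =====
def Claim_equal_makeItEqual : Prop := ∀ (a : Int) (b : Int) (c : Int), Dom_makeItEqual a b c → Spec_makeItEqual a b c (makeItEqual a b c)

-- ===== LEMMAS AND PROOFS =====

-- value of Nat.ldiff 1 k (the low bit of ¬k)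
theorem pv_ldiff_one (k : Nat) : Nat.ldiff 1 k = (!(k.testBit 0)).toNat := by
  apply Nat.eq_of_testBit_eq
  intro i
  rw [Nat.testBit_ldiff, Nat.testBit_bool_toNat]
  cases i with
  | zero => simp
  | succ j => simp [Nat.testBit_succ]

-- (x >> i) & 1 is the i-th bit of x, for every integer x (negatives included)
theorem pv_land_shift_one (x : Int) (i : Nat) :
    Int.land (Int.shiftRight x i) 1 = ((x.testBit i).toNat : Int) := by
  cases x with
  | ofNat m =>
      show (Int.ofNat ((m >>> i) &&& 1)) = _
      have : (m >>> i) &&& 1 = (m.testBit i).toNat := by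
        simp [Nat.and_one_is_mod, Nat.toNat_testBit, Nat.shiftRight_eq_div_pow]
      simp [this, Int.testBit]
  | negSucc m =>
      show (Int.ofNat (Nat.ldiff 1 (m >>> i))) = _
      rw [pv_ldiff_one]
      have : (m >>> i).testBit 0 = m.testBit i := by
        simp
      simp [this, Int.testBit]

-- the 30-bit mask of B
theorem pv_mask_eq : ((1 : Int) <<< (30 : Nat)) - 1 = ((2 ^ 30 - 1 : Nat) : Int) := by decide

theorem pv_mask_toNat_lt (x : Int) :
    (Int.land x ((2 ^ 30 - 1 : Nat) : Int)).toNat < 2 ^ 30 := by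
  cases x with
  | ofNat m =>
      show (Int.ofNat (m &&& (2 ^ 30 - 1))).toNat < 2 ^ 30
      have := Nat.and_le_right (n := m) (m := 2 ^ 30 - 1)
      simp only [Int.toNat]
      omega
  | negSucc m =>
      show (Int.ofNat (Nat.ldiff (2 ^ 30 - 1) m)).toNat < 2 ^ 30
      simp only [Int.toNat]
      apply Nat.lt_pow_two_of_testBit
      intro i hi
      rw [Nat.testBit_ldiff, Nat.testBit_two_pow_sub_one]
      simp [show ¬ i < 30 by omega]

theorem pv_mask_testBit (x : Int) (i : Nat) :
    ((Int.land x ((2 ^ 30 - 1 : Nat) : Int)).toNat).testBit i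
      = (x.testBit i && decide (i < 30)) := by
  cases x with
  | ofNat m =>
      show (m &&& (2 ^ 30 - 1)).testBit i = _
      rw [Nat.testBit_and, Nat.testBit_two_pow_sub_one]
      rfl
  | negSucc m =>
      show (Nat.ldiff (2 ^ 30 - 1) m).testBit i = _
      rw [Nat.testBit_ldiff, Nat.testBit_two_pow_sub_one, Bool.and_comm]
      rfl

theorem pv_pop_succ (n : Nat) (h : n ≠ 0) : pvPopcount n = n % 2 + pvPopcount (n / 2) := by
  cases n with
  | zero => exact absurd rfl h
  | succ m => rw [pvPopcount]

-- popcount of n < 2^k is the sum of its first k bits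
theorem pv_pop_eq_sum (k : Nat) : ∀ n : Nat, n < 2 ^ k →
    pvPopcount n = ∑ i ∈ Finset.range k, (n.testBit i).toNat := by
  induction k with
  | zero =>
      intro n hn
      interval_cases n
      simp [pvPopcount]
  | succ k ih =>
      intro n hn
      rcases Nat.eq_zero_or_pos n with h0 | h0
      · subst h0; simp [pvPopcount, Nat.zero_testBit]
      · rw [pv_pop_succ n (by omega), Finset.sum_range_succ']
        have hd : n / 2 < 2 ^ k := by
          rw [Nat.pow_succ] at hn; omega
        rw [ih (n / 2) hd]
        have ht : ∀ i, n.testBit (i + 1) = (n / 2).testBit i := by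
          intro i; rw [Nat.testBit_succ]
        rcases Nat.mod_two_eq_zero_or_one n with h | h <;>
          simp [ht, Nat.toNat_testBit, h, Nat.add_comm]

-- a fold of an additive step is a sum
theorem pv_foldl_sum (g : Nat → Int) (n : Nat) : ∀ s : Int,
    (List.range n).foldl (fun s i => s + g i) s = s + ∑ i ∈ Finset.range n, g i := by
  induction n with
  | zero => intro s; simp
  | succ m ih =>
      intro s
      rw [List.range_succ, List.foldl_append, ih, Finset.sum_range_succ]
      simp [add_assoc]

-- A's per-bit contribution, as a function of the three bits
def pvBitVal (a b c : Int) (i : Nat) : Int :=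
  ((!a.testBit i && c.testBit i).toNat : Int)
  + ((!b.testBit i && c.testBit i).toNat : Int)
  + ((a.testBit i && b.testBit i && !c.testBit i).toNat : Int)

theorem pv_step_eq (a b c : Int) (s : Int) (i : Nat) :
    (if Int.land (Int.shiftRight c i) 1 = 1 then
      let s := if Int.land (Int.shiftRight a i) 1 = 0 then s + 1 else s
      if Int.land (Int.shiftRight b i) 1 = 0 then s + 1 else s
    else
      if Int.land (Int.shiftRight a i) 1 = 1 ∧ Int.land (Int.shiftRight b i) 1 = 1 then s + 1
      else s) = s + pvBitVal a b c i := by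
  rw [pv_land_shift_one, pv_land_shift_one, pv_land_shift_one]
  unfold pvBitVal
  cases a.testBit i <;> cases b.testBit i <;> cases c.testBit i <;> simp <;> ring

-- the masked popcounts of B, as sums of per-bit indicators
theorem pv_pop_masked (x : Int) :
    (pvPopcount (Int.land x ((2 ^ 30 - 1 : Nat) : Int)).toNat : Int)
      = ∑ i ∈ Finset.range 30, ((x.testBit i).toNat : Int) := by
  rw [pv_pop_eq_sum 30 _ (pv_mask_toNat_lt x)]
  rw [Nat.cast_sum]
  apply Finset.sum_congr rfl
  intro i hi
  rw [pv_mask_testBit]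
  simp [Finset.mem_range.mp hi]

-- ===== VERDICT (by name: the statement is the Claim_ definition above) =====
theorem makeItEqual_spec : Claim_equal_makeItEqual := by
  intro a b c _
  show makeItEqual a b c = makeItEqual_alt a b c
  unfold makeItEqual makeItEqual_alt
  simp only [pv_mask_eq]
  rw [show (fun (flips : Int) (i : Nat) =>
        if Int.land (Int.shiftRight c i) 1 = 1 then
          let flips := if Int.land (Int.shiftRight a i) 1 = 0 then flips + 1 else flips
          if Int.land (Int.shiftRight b i) 1 = 0 then flips + 1 else flips
        else
          if Int.land (Int.shiftRight a i) 1 = 1 ∧ Int.land (Int.shiftRight b i) 1 = 1 then flips + 1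
          else flips)
      = fun (s : Int) (i : Nat) => s + pvBitVal a b c i from funext fun s => funext fun i => pv_step_eq a b c s i]
  rw [pv_foldl_sum, pv_pop_masked, pv_pop_masked, pv_pop_masked]
  rw [← Finset.sum_add_distrib, ← Finset.sum_add_distrib]
  rw [zero_add]
  apply Finset.sum_congr rfl
  intro i _
  unfold pvBitVal
  rw [Int.testBit_land, Int.testBit_land, Int.testBit_land, Int.testBit_land,
      Int.testBit_lnot, Int.testBit_lnot, Int.testBit_lnot]
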